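-- pv_equiv track=rewrite | github.com/rubenselander/pxstatspy | pxstatspy/request_divider.py | _get_partitions
-- ===== SOURCE A (Python) =====
-- import math
-- from typing import Dict, List, Optional, Tuple
--
-- Partition = Tuple[int, int]
--
-- def _get_partitions(
--     counts: List[int],
--     value_limit: int,
-- ) -> List[List[Partition]]:
--     """Enumerate feasible ``(num_batches, batch_size)`` pairs for each variable.
--
--     For a variable with *n* distinct values we consider cutting the list into
--     equally‑sized *batches* (the last batch may be smaller).  For every
--     feasible number of batches we keep **only the smallest** corresponding
--     batch size, because using larger batch sizes would always increase the
--     product and never decrease the request count.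
--
--     Args:
--         counts:         Number of distinct values per variable.
--         value_limit:    The maximum number of values allowed for each variable.
--
--     Returns:
--         A list whose *i*‑th element contains the feasible ``(num_batches,
--         batch_size)`` pairs for the *i*‑th variable.
--     """
--     options: List[List[Partition]] = []
--
--     for n_values in counts:
--         # Mapping: num_batches -> smallest feasible batch_size
--         best_for_batches: dict[int, int] = {}
--
--         # Iterate *descending* so that the first time we hit a particular
--         # num_batches it is guaranteed to be the **smallest** batch size that
--         # yields that many batches.
--         for batch_size in range(min(n_values, value_limit), 0, -1):
--             num_batches = math.ceil(n_values / batch_size)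
--             best_for_batches[num_batches] = batch_size
--
--         options.append(list(best_for_batches.items()))
--
--     return options
-- ===== SOURCE B (Python) =====
-- def _get_partitions(counts, value_limit):
--     """Divisor-block enumeration: instead of scanning every batch_size from
--     min(n, value_limit) down to 1, jump directly between the O(sqrt(n))
--     distinct values of num_batches = ceil(n / batch_size), emitting the
--     minimal batch_size ceil(n / num_batches) for each."""
--     options = []
--     for n_values in counts:
--         pairs = []
--         bs = min(n_values, value_limit)
--         while bs >= 1:
--             num_batches = -(-n_values // bs)          # ceil(n / bs)
--             min_bs = -(-n_values // num_batches)      # smallest bs giving num_batches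
--             pairs.append((num_batches, min_bs))
--             bs = min_bs - 1
--         options.append(pairs)
--     return options
-- ===== Notes on version B (the rewrite author's own statement) =====
-- stated objective: faster
-- what changed: Replaces the per-variable descending scan over every batch_size in [1, min(n, value_limit)] with a divisor-block jump that visits only the O(sqrt(n)) distinct values of ceil(n/batch_size), emitting (num_batches, ceil(n/num_batches)) directly per block, so no dict is needed.
import Mathlib
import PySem

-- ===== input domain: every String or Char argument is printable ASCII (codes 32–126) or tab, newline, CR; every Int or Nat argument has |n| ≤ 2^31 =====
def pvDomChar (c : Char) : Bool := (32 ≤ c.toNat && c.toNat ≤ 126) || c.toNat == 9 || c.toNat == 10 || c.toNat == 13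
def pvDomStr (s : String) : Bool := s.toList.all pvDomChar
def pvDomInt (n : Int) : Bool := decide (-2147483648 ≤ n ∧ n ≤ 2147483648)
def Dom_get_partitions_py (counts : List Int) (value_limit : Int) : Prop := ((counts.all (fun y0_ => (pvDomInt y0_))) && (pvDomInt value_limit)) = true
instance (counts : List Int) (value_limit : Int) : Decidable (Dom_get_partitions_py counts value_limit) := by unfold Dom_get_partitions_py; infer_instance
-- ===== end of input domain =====

-- B replaces A's scan over every batch_size with a divisor-block jump over the
-- O(sqrt(n)) distinct values of ceil(n/batch_size); objective: faster (asymptotic).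

-- ===== PORT A =====
-- ceiling division: Python's math.ceil(n_values / batch_size).  A computes it through
-- float division; for |n_values| ≤ 2^31 (the stated domain) the float result rounds to
-- the exact quotient's ceiling, so the exact integer ceiling -((-n) // b) is faithful.
def pvCeil (n b : Int) : Int := -(PySem.Int.floordiv (-n) b)

def get_partitions_py (counts : List Int) (value_limit : Int) : List (List (Int × Int)) :=
  counts.foldl (fun options n_values =>
    options ++ [((PySem.List.pyRange (min n_values value_limit) 0 (-1)).foldl
        (fun (best_for_batches : PySem.Dict Int Int) batch_size =>
          best_for_batches.insert (pvCeil n_values batch_size) batch_size)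
        PySem.Dict.empty).items]) []

-- ===== PORT B =====
-- Source B's while loop; fuel := (min n value_limit).toNat bounds the iteration count:
-- bs strictly decreases by at least 1 each pass, so the guard `fuel = 0` never cuts
-- the loop short on any input reachable from get_partitions_py_alt.
def altLoop (n : Int) : Nat → Int → List (Int × Int) → List (Int × Int)
  | 0, _, acc => acc
  | fuel + 1, bs, acc =>
    if 1 ≤ bs then
      let num_batches := pvCeil n bs
      let min_bs := pvCeil n num_batches
      altLoop n fuel (min_bs - 1) (acc ++ [(num_batches, min_bs)])
    else acc

def get_partitions_py_alt (counts : List Int) (value_limit : Int) : List (List (Int × Int)) :=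
  counts.foldl (fun options n_values =>
    options ++ [altLoop n_values (min n_values value_limit).toNat (min n_values value_limit) []]) []

-- ===== PRECONDITION & SPEC =====
def Spec_get_partitions_py (counts : List Int) (value_limit : Int) (out : List (List (Int × Int))) : Prop := out = get_partitions_py_alt counts value_limit
instance (counts : List Int) (value_limit : Int) (out : List (List (Int × Int))) : Decidable (Spec_get_partitions_py counts value_limit out) := by unfold Spec_get_partitions_py; infer_instance

-- ===== CLAIM (what is proved, stated in full; the proofs are below) =====
def Claim_equal_get_partitions_py : Prop := ∀ (counts : List Int) (value_limit : Int), Dom_get_partitions_py counts value_limit → Spec_get_partitions_py counts value_limit (get_partitions_py counts value_limit)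

-- ===== LEMMAS AND PROOFS =====

-- arithmetic facts about ceiling division
theorem pvCeil_spec {n b : Int} (hb : 0 < b) :
    (pvCeil n b - 1) * b < n ∧ n ≤ pvCeil n b * b :=
  (PySem.Int.neg_floordiv_neg_eq_iff_of_pos hb).mp rfl

theorem pvCeil_eq {n b q : Int} (hb : 0 < b) (h1 : (q - 1) * b < n) (h2 : n ≤ q * b) :
    pvCeil n b = q :=
  (PySem.Int.neg_floordiv_neg_eq_iff_of_pos hb).mpr ⟨h1, h2⟩

theorem pvCeil_pos {n b : Int} (hn : 1 ≤ n) (hb : 1 ≤ b) : 1 ≤ pvCeil n b := by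
  rcases pvCeil_spec (n := n) (b := b) (by omega) with ⟨_, h2⟩
  nlinarith

theorem pvCeil_min_le {n b : Int} (hn : 1 ≤ n) (hb : 1 ≤ b) :
    pvCeil n (pvCeil n b) ≤ b := by
  have hk := pvCeil_pos hn hb
  rcases pvCeil_spec (n := n) (b := b) (by omega) with ⟨_, h2⟩
  rcases pvCeil_spec (n := n) (b := pvCeil n b) (by omega) with ⟨h3, _⟩
  nlinarith

theorem pvCeil_block {n b b' : Int} (hn : 1 ≤ n) (hb : 1 ≤ b)
    (hlo : pvCeil n (pvCeil n b) ≤ b') (hhi : b' ≤ b) :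
    pvCeil n b' = pvCeil n b := by
  have hk := pvCeil_pos hn hb
  have hm := pvCeil_pos hn (le_trans hk (le_refl _))
  rcases pvCeil_spec (n := n) (b := b) (by omega) with ⟨h1, _⟩
  rcases pvCeil_spec (n := n) (b := pvCeil n b) (by omega) with ⟨_, h4⟩
  exact pvCeil_eq (by omega) (by nlinarith) (by nlinarith)

theorem pvCeil_strict {n b : Int} (hn : 1 ≤ n) (hb : 1 ≤ b)
    (hm : 2 ≤ pvCeil n (pvCeil n b)) :
    pvCeil n b + 1 ≤ pvCeil n (pvCeil n (pvCeil n b) - 1) := by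
  have hk := pvCeil_pos hn hb
  rcases pvCeil_spec (n := n) (b := pvCeil n b) (by omega) with ⟨h1, _⟩
  rcases pvCeil_spec (n := n) (b := pvCeil n (pvCeil n b) - 1) (by omega) with ⟨_, h4⟩
  nlinarith

-- abbreviation for A's inner fold step
def pvStep (n : Int) (d : PySem.Dict Int Int) (bs : Int) : PySem.Dict Int Int :=
  d.insert (pvCeil n bs) bs

-- the whole constant-ceiling block collapses to a single insert of the minimal batch size
theorem fold_block (n k m : Int) (hm : 1 ≤ m) :
    ∀ fuel (b : Int) (d : PySem.Dict Int Int), b.toNat ≤ fuel → m ≤ b →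
      (∀ b', m ≤ b' → b' ≤ b → pvCeil n b' = k) →
      (PySem.List.pyRange b 0 (-1)).foldl (pvStep n) d
        = (PySem.List.pyRange (m - 1) 0 (-1)).foldl (pvStep n) (d.insert k m) := by
  intro fuel
  induction fuel with
  | zero => intro b d hf hmb _; omega
  | succ f ih =>
    intro b d hf hmb hall
    rw [PySem.List.pyRange_neg_one_cons (by omega : (0:Int) < b)]
    simp only [List.foldl_cons]
    rcases eq_or_lt_of_le hmb with h | h
    · subst h
      have hstep : pvStep n d m = d.insert k m := by
        simp [pvStep, hall m (le_refl _) (le_refl _)]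
      rw [hstep]
    · have hb' : pvStep n d b = d.insert k b := by
        simp [pvStep, hall b (by omega) (le_refl _)]
      rw [hb', ih (b - 1) (d.insert k b) (by omega) (by omega)
        (fun b' h1 h2 => hall b' h1 (by omega))]
      rw [PySem.Dict.insert_insert_self]

-- altLoop appends onto its accumulator
theorem altLoop_acc (n : Int) :
    ∀ fuel (bs : Int) (acc : List (Int × Int)),
      altLoop n fuel bs acc = acc ++ altLoop n fuel bs [] := by
  intro fuel
  induction fuel with
  | zero => intro bs acc; simp [altLoop]
  | succ f ih =>
    intro bs acc
    by_cases h : 1 ≤ bs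
    · simp only [altLoop, if_pos h]
      rw [ih _ (acc ++ _), ih _ ([] ++ _)]
      simp
    · simp [altLoop, if_neg h]

theorem altLoop_nonpos (n : Int) (fuel : Nat) {bs : Int} (h : ¬ 1 ≤ bs)
    (acc : List (Int × Int)) : altLoop n fuel bs acc = acc := by
  cases fuel <;> simp [altLoop, if_neg h]

-- any fuel at least bs.toNat computes the same list
theorem altLoop_fuel (n : Int) (hn : 1 ≤ n) :
    ∀ meas (bs : Int), bs.toNat ≤ meas → ∀ f₁ f₂, bs.toNat ≤ f₁ → bs.toNat ≤ f₂ →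
      altLoop n f₁ bs [] = altLoop n f₂ bs [] := by
  intro meas
  induction meas with
  | zero =>
    intro bs hm f₁ f₂ _ _
    have h : ¬ 1 ≤ bs := by omega
    rw [altLoop_nonpos n _ h, altLoop_nonpos n _ h]
  | succ mm ih =>
    intro bs hm f₁ f₂ h₁ h₂
    by_cases h : 1 ≤ bs
    · obtain ⟨g₁, rfl⟩ : ∃ g, f₁ = g + 1 := ⟨f₁ - 1, by omega⟩
      obtain ⟨g₂, rfl⟩ : ∃ g, f₂ = g + 1 := ⟨f₂ - 1, by omega⟩
      simp only [altLoop, if_pos h]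
      have hmle := pvCeil_min_le hn h
      have hmpos := pvCeil_pos hn (pvCeil_pos hn h)
      rw [altLoop_acc n g₁, altLoop_acc n g₂,
        ih (pvCeil n (pvCeil n bs) - 1) (by omega) g₁ g₂ (by omega) (by omega)]
    · rw [altLoop_nonpos n _ h, altLoop_nonpos n _ h]

-- MAIN: A's inner dict fold produces exactly B's block-jump list
theorem main_lemma (n : Int) (hn : 1 ≤ n) :
    ∀ meas (b : Int) (d : PySem.Dict Int Int), b.toNat ≤ meas → 1 ≤ b →
      (∀ x ∈ d.keys, x < pvCeil n b) →
      ((PySem.List.pyRange b 0 (-1)).foldl (pvStep n) d).items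
        = d.items ++ altLoop n b.toNat b [] := by
  intro meas
  induction meas with
  | zero => intro b d hm hb _; omega
  | succ mm ih =>
    intro b d hm hb hkeys
    set k := pvCeil n b with hk
    set m := pvCeil n k with hmdef
    have hk1 : 1 ≤ k := pvCeil_pos hn hb
    have hm1 : 1 ≤ m := pvCeil_pos hn hk1
    have hmb : m ≤ b := pvCeil_min_le hn hb
    have hfresh : d.contains k = false := by
      by_contra hc
      have : d.contains k = true := by
        cases hcc : d.contains k
        · exact absurd hcc hc
        · rfl
      exact absurd (hkeys k ((PySem.Dict.contains_iff_mem_keys d k).mp this)) (lt_irrefl k)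
    have hblk := fold_block n k m hm1 b.toNat b d (le_refl _) hmb
      (fun b' h1 h2 => pvCeil_block hn hb h1 h2)
    rw [hblk]
    -- unfold one step of altLoop
    obtain ⟨g, hg⟩ : ∃ g, b.toNat = g + 1 := ⟨b.toNat - 1, by omega⟩
    rw [hg]
    simp only [altLoop, if_pos hb]
    rw [altLoop_acc n g]
    by_cases hm2 : 2 ≤ m
    · have hnext : pvCeil n b + 1 ≤ pvCeil n (m - 1) := pvCeil_strict hn hb hm2
      rw [ih (m - 1) (d.insert k m) (by omega) (by omega)
        (by
          intro x hx
          rcases (PySem.Dict.mem_keys_insert d k x m).mp hx with rfl | hx'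
          · omega
          · have := hkeys x hx'; omega)]
      rw [PySem.Dict.items_insert_of_not_contains d m hfresh]
      rw [altLoop_fuel n hn ((m - 1).toNat) (m - 1) (le_refl _) ((m-1).toNat) g
        (le_refl _) (by omega)]
      simp only [← hk, ← hmdef]
      simp
    · have hmeq : m = 1 := by omega
      rw [hmeq]
      rw [PySem.List.pyRange_neg_one_eq_nil (by omega : (1:Int) - 1 ≤ 0)]
      simp only [List.foldl_nil]
      rw [PySem.Dict.items_insert_of_not_contains d 1 hfresh]
      simp only [← hk, ← hmdef, hmeq]
      rw [altLoop_nonpos n g (by omega) _]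
      simp

-- per-element agreement (stated with A's literal inner lambda; pvStep is its definitional wrapper)
theorem per_elem (n vl : Int) :
    ((PySem.List.pyRange (min n vl) 0 (-1)).foldl
        (fun (best_for_batches : PySem.Dict Int Int) batch_size =>
          best_for_batches.insert (pvCeil n batch_size) batch_size)
        PySem.Dict.empty).items
      = altLoop n (min n vl).toNat (min n vl) [] := by
  show ((PySem.List.pyRange (min n vl) 0 (-1)).foldl (pvStep n) PySem.Dict.empty).items
      = altLoop n (min n vl).toNat (min n vl) []
  by_cases h : 1 ≤ min n vl
  · have hn : 1 ≤ n := le_trans h (min_le_left _ _)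
    have := main_lemma n hn (min n vl).toNat (min n vl) PySem.Dict.empty (le_refl _) h
      (by simp [PySem.Dict.keys_empty])
    rw [this]
    simp [PySem.Dict.empty]
  · rw [PySem.List.pyRange_neg_one_eq_nil (by omega : min n vl ≤ 0)]
    rw [altLoop_nonpos n _ h]
    simp [PySem.Dict.empty]

-- both outer folds agree step by step
theorem outer_eq (vl : Int) :
    ∀ (counts : List Int) (init : List (List (Int × Int))),
      counts.foldl (fun options n_values =>
        options ++ [((PySem.List.pyRange (min n_values vl) 0 (-1)).foldl
            (fun (best_for_batches : PySem.Dict Int Int) batch_size =>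
              best_for_batches.insert (pvCeil n_values batch_size) batch_size)
            PySem.Dict.empty).items]) init
      = counts.foldl (fun options n_values =>
        options ++ [altLoop n_values (min n_values vl).toNat (min n_values vl) []]) init := by
  intro counts
  induction counts with
  | nil => intro init; rfl
  | cons x xs ih =>
    intro init
    simp only [List.foldl_cons]
    rw [per_elem x vl]
    exact ih _

-- ===== VERDICT (by name: the statement is the Claim_ definition above) =====
theorem get_partitions_py_spec : Claim_equal_get_partitions_py := by
  intro counts value_limit _
  unfold Spec_get_partitions_py get_partitions_py get_partitions_py_alt
  exact outer_eq value_limit counts []
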